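-- pv_equiv track=rewrite | github.com/Chorus-Yuen/Python-Network-Plotter | Network_plotter.py | MakeColour
-- ===== SOURCE A (Python) =====
-- def MakeColour(r, g, b, no):                                                                       # Make the colour
--     def DecHex(num):                                                                               # Convert from Dec to Hex
--         a = num // 16
--         b = num % 16
--         if a >= 10: a = chr(a + 55)
--         if b >= 10: b = chr(b + 55)
--         a, b = str(a), str(b)
--         return a + b
--
--     start = [r, g, b]
--     end = ["", "", ""]
--     ind = start.index(min(start))
--     end[ind] = start[ind] + Widgets[no][0]
--     ind2 = start.index(max(start))
--     end[ind2] = start[ind2] + Widgets[no][2]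
--     start.pop(ind)
--     if ind < ind2: start.pop(ind2 - 1)
--     else: start.pop(ind2)
--     for i in range(len(end)):
--         if end[i] == "":
--             end[i] = start[0] + Widgets[no][1]
--     for i in range(len(end)):
--         if end[i] > 255: end[i] = 255
--         if end[i] < 0: end[i] = 0
--     Colour = "#{}{}{}".format(DecHex(end[0]), DecHex(end[1]), DecHex(end[2]))
--     return Colour
--
-- Widgets = [(-160, -176, -144),
--            (18, 9, 3),
--            (36, 18, 6),
--            (-36, -18, -6),
--            (-80, -40, -8),
--            (-80, -96, -64),
--            (-126, -70, -14),
--            (-200, -144, 3),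
--            (-144, -144, -36)]
-- ===== SOURCE B (Python) =====
-- Widgets = [(-160, -176, -144),
--            (18, 9, 3),
--            (36, 18, 6),
--            (-36, -18, -6),
--            (-80, -40, -8),
--            (-80, -96, -64),
--            (-126, -70, -14),
--            (-200, -144, 3),
--            (-144, -144, -36)]
--
-- def MakeColour(r, g, b, no):
--     def DecHex(num):
--         a = num // 16
--         b = num % 16
--         if a >= 10: a = chr(a + 55)
--         if b >= 10: b = chr(b + 55)
--         a, b = str(a), str(b)
--         return a + b
--
--     lo, mid, hi = Widgets[no]
--     vals = [r, g, b]
--     imin = vals.index(min(vals))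
--     imax = vals.index(max(vals))
--     offsets = [mid, mid, mid]
--     offsets[imin] = lo
--     offsets[imax] = hi                      # max offset wins when all three are equal
--     end = [min(255, max(0, v + o)) for v, o in zip(vals, offsets)]
--     return "#{}{}{}".format(DecHex(end[0]), DecHex(end[1]), DecHex(end[2]))
-- ===== Notes on version B (the rewrite author's own statement) =====
-- stated objective: simpler
-- what changed: A builds the result by writing min/max slots into a sentinel-filled list, popping the min and max out of a copy and back-filling blanks with the leftover element; B instead builds a per-channel offsets list (mid everywhere, then lo at the min index and hi at the max index, so the hi offset wins when all channels are equal) and clamps vals[i]+offsets[i] in one zip, with no pops, sentinels or back-filling.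
import Mathlib
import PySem

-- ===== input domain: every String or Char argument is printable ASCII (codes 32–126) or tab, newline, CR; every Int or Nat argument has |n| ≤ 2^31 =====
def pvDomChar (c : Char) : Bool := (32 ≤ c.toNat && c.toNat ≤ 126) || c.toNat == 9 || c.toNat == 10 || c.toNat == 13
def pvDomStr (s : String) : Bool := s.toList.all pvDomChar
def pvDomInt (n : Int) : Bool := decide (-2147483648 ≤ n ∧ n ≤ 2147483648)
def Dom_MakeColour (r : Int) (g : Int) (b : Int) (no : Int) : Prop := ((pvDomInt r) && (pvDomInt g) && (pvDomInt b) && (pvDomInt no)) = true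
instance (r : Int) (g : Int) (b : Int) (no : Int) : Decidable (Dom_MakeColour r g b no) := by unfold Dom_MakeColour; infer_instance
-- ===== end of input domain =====

-- B replaces A's pop-the-min-and-max bookkeeping by a per-channel offsets list and a zip; objective: simpler.

-- shared module constant Widgets
def WidgetsA : List (Int × Int × Int) :=
  [(-160, -176, -144), (18, 9, 3), (36, 18, 6), (-36, -18, -6), (-80, -40, -8),
   (-80, -96, -64), (-126, -70, -14), (-200, -144, 3), (-144, -144, -36)]

-- the nested helper DecHex (identical in A and in B, kept shared); on this Int-only
-- domain its argument is always clamped to 0..255, str(int) = PySem.Int.toChars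
def DecHexChars (num : Int) : List Char :=
  let a := PySem.Int.floordiv num 16
  let b := PySem.Int.mod num 16
  let aC : List Char := if a ≥ 10 then [Char.ofNat (a + 55).toNat] else PySem.Int.toChars a
  let bC : List Char := if b ≥ 10 then [Char.ofNat (b + 55).toNat] else PySem.Int.toChars b
  aC ++ bC

-- ===== PORT A =====
-- body of A after the Widgets[no] lookup (w = Widgets[no]); "" slots of `end` are `none`
def pvRunA (r : Int) (g : Int) (b : Int) (w : Int × Int × Int) : String :=
  let start : List Int := [r, g, b]
  let endL : List (Option Int) := [none, none, none]
  let mn := (PySem.List.min? start (fun x => x)).getD 0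
  let ind := (PySem.List.index? start mn).getD 0
  let endL := PySem.List.pySetD endL (ind : Int) (some (start.getD ind 0 + w.1))
  let mx := (PySem.List.max? start (fun x => x)).getD 0
  let ind2 := (PySem.List.index? start mx).getD 0
  let endL := PySem.List.pySetD endL (ind2 : Int) (some (start.getD ind2 0 + w.2.2))
  let start := ((PySem.List.pop? start (ind : Int)).map Prod.snd).getD []
  let start := if ind < ind2 then ((PySem.List.pop? start ((ind2 : Int) - 1)).map Prod.snd).getD []
               else ((PySem.List.pop? start (ind2 : Int)).map Prod.snd).getD []
  let endL := endL.map (fun e => match e with | none => some (start.getD 0 0 + w.2.1) | some v => some v)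
  let endL := endL.map (fun e => e.map (fun v => let v := if v > 255 then 255 else v; if v < 0 then 0 else v))
  String.ofList ('#' :: (DecHexChars ((endL.getD 0 none).getD 0) ++ DecHexChars ((endL.getD 1 none).getD 0) ++ DecHexChars ((endL.getD 2 none).getD 0)))

def MakeColour (r : Int) (g : Int) (b : Int) (no : Int) : String :=
  pvRunA r g b ((PySem.List.pyGet? WidgetsA no).getD (0, 0, 0))

-- ===== PORT B =====
-- body of B after the Widgets[no] lookup (w = (lo, mid, hi))
def pvRunB (r : Int) (g : Int) (b : Int) (w : Int × Int × Int) : String :=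
  let vals : List Int := [r, g, b]
  let imin := (PySem.List.index? vals ((PySem.List.min? vals (fun x => x)).getD 0)).getD 0
  let imax := (PySem.List.index? vals ((PySem.List.max? vals (fun x => x)).getD 0)).getD 0
  let offs := ([w.2.1, w.2.1, w.2.1].set imin w.1).set imax w.2.2
  let endL := (vals.zip offs).map (fun p => min 255 (max 0 (p.1 + p.2)))
  String.ofList ('#' :: (DecHexChars (endL.getD 0 0) ++ DecHexChars (endL.getD 1 0) ++ DecHexChars (endL.getD 2 0)))

def MakeColour_alt (r : Int) (g : Int) (b : Int) (no : Int) : String :=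
  pvRunB r g b ((PySem.List.pyGet? WidgetsA no).getD (0, 0, 0))

-- ===== PRECONDITION & SPEC =====
-- Pre_ excludes exactly the `no` outside Python's index range of the 9-element Widgets list, where A raises IndexError (B raises too).
def Pre_MakeColour (r : Int) (g : Int) (b : Int) (no : Int) : Prop := -9 ≤ no ∧ no < 9
instance (r : Int) (g : Int) (b : Int) (no : Int) : Decidable (Pre_MakeColour r g b no) := by unfold Pre_MakeColour; infer_instance
def pvWitness_MakeColour : Int × Int × Int × Int := (100, 50, 200, 1)

def Spec_MakeColour (r : Int) (g : Int) (b : Int) (no : Int) (out : String) : Prop := out = MakeColour_alt r g b no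
instance (r : Int) (g : Int) (b : Int) (no : Int) (out : String) : Decidable (Spec_MakeColour r g b no out) := by unfold Spec_MakeColour; infer_instance

-- ===== CLAIM (what is proved, stated in full; the proofs are below) =====
def Claim_equal_MakeColour : Prop := ∀ (r : Int) (g : Int) (b : Int) (no : Int), Dom_MakeColour r g b no → Pre_MakeColour r g b no → Spec_MakeColour r g b no (MakeColour r g b no)

-- ===== LEMMAS AND PROOFS =====
set_option maxHeartbeats 2000000 in
theorem pvRun_eq (r g b : Int) (w : Int × Int × Int) : pvRunA r g b w = pvRunB r g b w := by
  obtain ⟨w0, w1, w2⟩ := w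
  have hcl : ∀ v : Int, (if (if 255 < v then 255 else v) < 0 then (0:Int) else if 255 < v then 255 else v) = min 255 (max 0 v) := by
    intro v; omega
  rcases lt_trichotomy r g with h1 | h1 | h1 <;>
  rcases lt_trichotomy g b with h2 | h2 | h2 <;>
  rcases lt_trichotomy r b with h3 | h3 | h3 <;>
  first
  | omega
  | (subst_eqs
     try have e1 : r ≠ g := by omega
     try have e2 : g ≠ r := by omega
     try have e3 : g ≠ b := by omega
     try have e4 : b ≠ g := by omega
     try have e5 : r ≠ b := by omega
     try have e6 : b ≠ r := by omega
     try have n1 : ¬ g < r := by omega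
     try have n2 : ¬ r < g := by omega
     try have n3 : ¬ b < g := by omega
     try have n4 : ¬ g < b := by omega
     try have n5 : ¬ b < r := by omega
     try have n6 : ¬ r < b := by omega
     simp only [pvRunA, pvRunB]
     simp [PySem.List.min?, PySem.List.max?, PySem.List.index?, PySem.List.pop?,
           PySem.List.pySetD, PySem.List.pySet?, PySem.List.pyIdx?, List.idxOf?, List.findIdx?_cons,
           beq_iff_eq, hcl, *]
     try (split_ifs <;> first | rfl | omega))

-- ===== VERDICT (by name: the statement is the Claim_ definition above) =====
theorem MakeColour_spec : Claim_equal_MakeColour := by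
  intro r g b no _ _
  unfold Spec_MakeColour MakeColour MakeColour_alt
  exact pvRun_eq r g b _
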